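-- pv_equiv track=rewrite | github.com/psymoney/prepCodingTest | BOJ/1548.py | answer
-- ===== SOURCE A (Python) =====
-- def answer(N: list) -> int:
--     l = len(N)
--     if l < 3:
--         return l
--
--     M = 2
--
--     for x in range(l - 2):
--         for z in range(l - 1, x + 1, -1):
--             if N[x] + N[x+1] > N[z]:
--                 M = max(M, z - x + 1)
--
--     return M
-- ===== SOURCE B (Python) =====
-- from bisect import bisect_left
--
--
-- def answer(N: list) -> int:
--     l = len(N)
--     if l < 3:
--         return l
--
--     # sort (value, index) pairs once; prefix-max of indices over that order
--     pairs = sorted(((v, i) for i, v in enumerate(N)), key=lambda p: p[0])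
--     vals = [v for v, _ in pairs]
--     pref = []
--     m = -1
--     for _, i in pairs:
--         m = max(m, i)
--         pref.append(m)
--
--     M = 2
--     for x in range(l - 2):
--         k = bisect_left(vals, N[x] + N[x + 1])
--         if k > 0:
--             z = pref[k - 1]          # largest index whose value is < N[x]+N[x+1]
--             if z >= x + 2:
--                 M = max(M, z - x + 1)
--     return M
-- ===== Notes on version B (the rewrite author's own statement) =====
-- stated objective: faster
-- what changed: A's nested quadratic scan (for each x, scan all z from the right) is replaced by sorting (value, index) pairs once, building a prefix-max-of-index table over the sorted order, and doing one bisect_left per x to find the largest index whose value is below N[x]+N[x+1].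
import Mathlib
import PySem

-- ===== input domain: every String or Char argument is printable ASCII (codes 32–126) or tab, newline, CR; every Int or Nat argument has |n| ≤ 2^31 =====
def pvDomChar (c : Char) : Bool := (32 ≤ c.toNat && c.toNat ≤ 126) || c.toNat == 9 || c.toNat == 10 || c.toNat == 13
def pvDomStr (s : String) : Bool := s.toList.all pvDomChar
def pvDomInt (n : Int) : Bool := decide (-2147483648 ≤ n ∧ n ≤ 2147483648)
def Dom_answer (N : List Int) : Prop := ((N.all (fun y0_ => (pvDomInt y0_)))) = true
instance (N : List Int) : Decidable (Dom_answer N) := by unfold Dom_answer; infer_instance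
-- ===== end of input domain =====

-- B replaces A's quadratic double scan by one sort of (value, index) pairs with a prefix-max
-- index table and a binary search (bisect_left) per position: O(n log n) instead of O(n^2).

-- ===== PORT A =====
def answer (N : List Int) : Int :=
  let l : Int := PySem.List.len N
  if l < 3 then l
  else
    (PySem.List.pyRange 0 (l - 2) 1).foldl (fun M x =>
      (PySem.List.pyRange (l - 1) (x + 1) (-1)).foldl (fun M z =>
        if PySem.List.pyGetD N x 0 + PySem.List.pyGetD N (x + 1) 0 > PySem.List.pyGetD N z 0
        then max M (z - x + 1) else M) M) 2

-- ===== PORT B =====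
def answer_alt (N : List Int) : Int :=
  let l : Int := PySem.List.len N
  if l < 3 then l
  else
    let pairs := PySem.List.sorted ((PySem.List.enumerate N 0).map (fun p => (p.2, p.1))) (fun p => p.1) false
    let vals := pairs.map (fun p => p.1)
    let pref := (pairs.foldl (fun st p => (st.1 ++ [max st.2 p.2], max st.2 p.2)) (([] : List Int), (-1 : Int))).1
    (PySem.List.pyRange 0 (l - 2) 1).foldl (fun M x =>
      let k := PySem.List.bisectLeft vals (PySem.List.pyGetD N x 0 + PySem.List.pyGetD N (x + 1) 0)
      if 0 < k then
        if x + 2 ≤ PySem.List.pyGetD pref ((k : Int) - 1) 0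
        then max M (PySem.List.pyGetD pref ((k : Int) - 1) 0 - x + 1) else M
      else M) 2

-- ===== PRECONDITION & SPEC =====
def Spec_answer (N : List Int) (out : Int) : Prop := out = answer_alt N
instance (N : List Int) (out : Int) : Decidable (Spec_answer N out) := by unfold Spec_answer; infer_instance

-- ===== CLAIM (what is proved, stated in full; the proofs are below) =====
def Claim_equal_answer : Prop := ∀ (N : List Int), Dom_answer N → Spec_answer N (answer N)

-- ===== LEMMAS AND PROOFS =====

/-- Indices of `N` whose value is `< s`, in order. -/
def pvIdxs (N : List Int) (s : Int) : List Int :=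
  ((PySem.List.enumerate N 0).filter (fun p => decide (p.2 < s))).map (fun p => p.1)

/-- Largest index of `N` whose value is `< s` (`-1` if none). -/
def pvZstar (N : List Int) (s : Int) : Int := (pvIdxs N s).foldl max (-1)

theorem pv_mem_idxs (N : List Int) (s j : Int) :
    j ∈ pvIdxs N s ↔ 0 ≤ j ∧ j < (N.length : Int) ∧ PySem.List.pyGetD N j 0 < s := by
  simp only [pvIdxs, List.mem_map, List.mem_filter, PySem.List.mem_enumerate_iff]
  constructor
  · rintro ⟨p, ⟨⟨k, hk, rfl⟩, hs⟩, rfl⟩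
    simp only [decide_eq_true_eq] at hs
    simp only [zero_add]
    refine ⟨Int.natCast_nonneg k, by exact_mod_cast hk, ?_⟩
    rw [PySem.List.pyGetD_eq_getElem N 0 (Int.natCast_nonneg k) (by exact_mod_cast hk)]
    simpa using hs
  · rintro ⟨h0, hl, hs⟩
    have hlt : j.toNat < N.length := by omega
    refine ⟨(j, N[j.toNat]), ⟨⟨j.toNat, hlt, ?_⟩, ?_⟩, rfl⟩
    · simp [Int.toNat_of_nonneg h0]
    · simp only [decide_eq_true_eq]
      rw [PySem.List.pyGetD_eq_getElem N 0 h0 hl] at hs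
      exact hs

theorem pv_foldl_max_eq_of (L : List Int) (M b : Int) (hb : b ∈ L) (hub : ∀ y ∈ L, y ≤ b) :
    L.foldl max M = max M b := by
  have h1 := PySem.List.le_foldl_max L M
  apply le_antisymm
  · rcases PySem.List.foldl_max_mem L M with h | h
    · rw [h]; exact le_max_left _ _
    · exact le_trans (hub _ h) (le_max_right _ _)
  · exact max_le h1.1 (h1.2 b hb)

theorem pv_zstar_ub (N : List Int) (s : Int) : ∀ j ∈ pvIdxs N s, j ≤ pvZstar N s :=
  (PySem.List.le_foldl_max (pvIdxs N s) (-1)).2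

theorem pv_zstar_mem (N : List Int) (s : Int) :
    pvZstar N s = -1 ∨ pvZstar N s ∈ pvIdxs N s :=
  PySem.List.foldl_max_mem (pvIdxs N s) (-1)

/-- The prefix-max building loop of B. -/
theorem pv_pref_fold (ps : List (Int × Int)) (acc : List Int) (m : Int) :
    (ps.foldl (fun st p => (st.1 ++ [max st.2 p.2], max st.2 p.2)) (acc, m)).1
      = acc ++ (List.range ps.length).map
          (fun j => ((ps.take (j + 1)).map (fun p => p.2)).foldl max m) := by
  induction ps generalizing acc m with
  | nil => simp
  | cons p t ih =>
    simp only [List.foldl_cons]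
    rw [ih]
    simp only [List.length_cons, List.range_succ_eq_map, List.map_cons, List.map_map]
    simp [List.take_succ_cons, List.append_assoc, Function.comp]

/-- The first `bisectLeft` entries of the sorted pair list are exactly those with value `< s`. -/
theorem pv_take_k (N : List Int) (s : Int) :
    (PySem.List.sorted ((PySem.List.enumerate N 0).map (fun p => (p.2, p.1))) (fun p => p.1) false).take
        (PySem.List.bisectLeft ((PySem.List.sorted ((PySem.List.enumerate N 0).map (fun p => (p.2, p.1))) (fun p => p.1) false).map (fun p => p.1)) s)
      = (PySem.List.sorted ((PySem.List.enumerate N 0).map (fun p => (p.2, p.1))) (fun p => p.1) false).filter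
          (fun p => decide (p.1 < s)) := by
  set pairs := PySem.List.sorted ((PySem.List.enumerate N 0).map (fun p => (p.2, p.1))) (fun p => p.1) false with hpairs
  set vals := pairs.map (fun p => p.1) with hvals
  set k := PySem.List.bisectLeft vals s with hk
  have hpw : vals.Pairwise (· ≤ ·) := by
    rw [hvals]
    exact (List.pairwise_map).mpr (PySem.List.sorted_pairwise _ _)
  obtain ⟨hkle, hlt, hge⟩ := PySem.List.bisectLeft_spec vals s hpw
  have hlen : vals.length = pairs.length := by simp [hvals]
  rw [hlen] at hkle
  -- filter (take k) = take k, filter (drop k) = []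
  have h1 : (pairs.take k).filter (fun p => decide (p.1 < s)) = pairs.take k := by
    apply List.filter_eq_self.mpr
    intro p hp
    obtain ⟨j, hj, rfl⟩ := List.mem_iff_getElem.mp hp
    have hjk : j < k := lt_of_lt_of_le hj (by simp)
    have hjp : j < pairs.length := lt_of_lt_of_le hj (by simp [List.length_take])
    have := hlt j (by omega) (by omega)
    rw [List.getElem_take]
    simpa [hvals] using this
  have h2 : (pairs.drop k).filter (fun p => decide (p.1 < s)) = [] := by
    apply List.filter_eq_nil_iff.mpr
    intro p hp
    obtain ⟨j, hj, rfl⟩ := List.mem_iff_getElem.mp hp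
    have hj' : j < pairs.length - k := by simpa [List.length_drop] using hj
    have := hge (k + j) (by omega) (by omega)
    rw [List.getElem_drop]
    simpa [hvals] using this
  conv_rhs => rw [← List.take_append_drop k pairs]
  rw [List.filter_append, h1, h2, List.append_nil]

theorem pv_filter_perm (N : List Int) (s : Int) :
    (((PySem.List.sorted ((PySem.List.enumerate N 0).map (fun p => (p.2, p.1))) (fun p => p.1) false).filter
        (fun p => decide (p.1 < s))).map (fun p => p.2)).Perm (pvIdxs N s) := by
  have hperm := PySem.List.sorted_perm ((PySem.List.enumerate N 0).map (fun p => (p.2, p.1))) (fun p => p.1) false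
  have h1 := (hperm.filter (fun p => decide (p.1 < s))).map (fun p => p.2)
  refine h1.trans ?_
  unfold pvIdxs
  rw [List.filter_map, List.map_map]
  simp only [Function.comp_def]
  exact List.Perm.refl _

/-- A's inner descending scan computes the window ending at the largest qualifying index. -/
theorem pv_innerA (N : List Int) (x M s : Int) (hx : 0 ≤ x) :
    (PySem.List.pyRange ((N.length : Int) - 1) (x + 1) (-1)).foldl
        (fun M z => if s > PySem.List.pyGetD N z 0 then max M (z - x + 1) else M) M
      = if x + 2 ≤ pvZstar N s then max M (pvZstar N s - x + 1) else M := by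
  rw [PySem.List.foldl_ite_eq_foldl_filter (fun z => s > PySem.List.pyGetD N z 0)
        (fun M z => max M (z - x + 1))]
  rw [← List.foldl_map (f := fun z => z - x + 1) (g := max)]
  set C := (PySem.List.pyRange ((N.length : Int) - 1) (x + 1) (-1)).filter
      (fun z => decide (s > PySem.List.pyGetD N z 0)) with hC
  have hmemC : ∀ z ∈ C, z ∈ pvIdxs N s ∧ x + 2 ≤ z := by
    intro z hz
    rw [hC, List.mem_filter] at hz
    obtain ⟨hzr, hzc⟩ := hz
    rw [PySem.List.mem_pyRange_neg_one] at hzr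
    simp only [decide_eq_true_eq] at hzc
    refine ⟨(pv_mem_idxs N s z).mpr ⟨by omega, by omega, hzc⟩, by omega⟩
  by_cases hz : x + 2 ≤ pvZstar N s
  · rw [if_pos hz]
    apply pv_foldl_max_eq_of
    · have hzi : pvZstar N s ∈ pvIdxs N s := by
        rcases pv_zstar_mem N s with h | h
        · omega
        · exact h
      obtain ⟨h0, hl, hs⟩ := (pv_mem_idxs N s _).mp hzi
      refine List.mem_map.mpr ⟨pvZstar N s, ?_, rfl⟩
      rw [hC, List.mem_filter, PySem.List.mem_pyRange_neg_one]
      exact ⟨⟨by omega, by omega⟩, by simpa using hs⟩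
    · intro y hy
      obtain ⟨z, hzC, rfl⟩ := List.mem_map.mp hy
      have := (hmemC z hzC).1
      have := pv_zstar_ub N s z this
      omega
  · rw [if_neg hz]
    have : C = [] := by
      rw [List.eq_nil_iff_forall_not_mem]
      intro z hzC
      obtain ⟨hzi, hzx⟩ := hmemC z hzC
      have := pv_zstar_ub N s z hzi
      omega
    rw [this]
    rfl

/-- B's bisect + prefix-max lookup computes the same quantity. -/
theorem pv_innerB (N : List Int) (x M s : Int) (hx : 0 ≤ x) :
    (if 0 < PySem.List.bisectLeft ((PySem.List.sorted ((PySem.List.enumerate N 0).map (fun p => (p.2, p.1))) (fun p => p.1) false).map (fun p => p.1)) s then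
       if x + 2 ≤ PySem.List.pyGetD
            ((((PySem.List.sorted ((PySem.List.enumerate N 0).map (fun p => (p.2, p.1))) (fun p => p.1) false)).foldl
                (fun st p => (st.1 ++ [max st.2 p.2], max st.2 p.2)) (([] : List Int), (-1 : Int))).1)
            ((PySem.List.bisectLeft ((PySem.List.sorted ((PySem.List.enumerate N 0).map (fun p => (p.2, p.1))) (fun p => p.1) false).map (fun p => p.1)) s : Int) - 1) 0
       then max M (PySem.List.pyGetD
            ((((PySem.List.sorted ((PySem.List.enumerate N 0).map (fun p => (p.2, p.1))) (fun p => p.1) false)).foldl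
                (fun st p => (st.1 ++ [max st.2 p.2], max st.2 p.2)) (([] : List Int), (-1 : Int))).1)
            ((PySem.List.bisectLeft ((PySem.List.sorted ((PySem.List.enumerate N 0).map (fun p => (p.2, p.1))) (fun p => p.1) false).map (fun p => p.1)) s : Int) - 1) 0 - x + 1)
       else M
     else M)
      = if x + 2 ≤ pvZstar N s then max M (pvZstar N s - x + 1) else M := by
  set pairs := PySem.List.sorted ((PySem.List.enumerate N 0).map (fun p => (p.2, p.1))) (fun p => p.1) false with hpairs
  set k := PySem.List.bisectLeft (pairs.map (fun p => p.1)) s with hk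
  have hplen : pairs.length = N.length := by
    rw [hpairs, (PySem.List.sorted_perm _ _ _).length_eq]
    simp [PySem.List.length_enumerate]
  have hkle : k ≤ pairs.length := by
    have hpw : (pairs.map (fun p => p.1)).Pairwise (· ≤ ·) :=
      (List.pairwise_map).mpr (PySem.List.sorted_pairwise _ _)
    have := (PySem.List.bisectLeft_spec (pairs.map (fun p => p.1)) s hpw).1
    simpa using this
  -- the take-k multiset is the `< s` multiset; its index fold is pvZstar when k > 0
  have hperm : ((pairs.take k).map (fun p => p.2)).Perm (pvIdxs N s) := by
    rw [hk, hpairs, pv_take_k]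
    exact pv_filter_perm N s
  by_cases hk0 : 0 < k
  · rw [if_pos hk0]
    have hprefix := (pv_pref_fold pairs [] (-1)).trans (List.nil_append _)
    have hz : PySem.List.pyGetD
        ((pairs.foldl (fun st p => (st.1 ++ [max st.2 p.2], max st.2 p.2)) (([] : List Int), (-1 : Int))).1)
        ((k : Int) - 1) 0 = pvZstar N s := by
      rw [hprefix]
      rw [PySem.List.pyGetD_eq_getElem _ _ (by omega)
            (by simp [List.length_range]; omega)]
      simp only [List.getElem_map, List.getElem_range]
      have htn : ((k : Int) - 1).toNat = k - 1 := by omega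
      rw [htn]
      have hsucc : k - 1 + 1 = k := by omega
      rw [hsucc]
      rw [pvZstar]
      exact @List.Perm.foldl_eq _ _ max _ _ ⟨fun a b c => max_right_comm a b c⟩ hperm (-1)
    rw [hz]
  · rw [if_neg hk0]
    have hknil : pairs.take k = [] := by
      have : k = 0 := by omega
      simp [this]
    have hnil : pvIdxs N s = [] := by
      have := hperm
      rw [hknil] at this
      exact (this.symm).eq_nil
    have : pvZstar N s = -1 := by rw [pvZstar, hnil]; rfl
    rw [this, if_neg (by omega)]

-- ===== VERDICT (by name: the statement is the Claim_ definition above) =====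
theorem answer_spec : Claim_equal_answer := by
  intro N _
  unfold Spec_answer
  simp only [answer, answer_alt, PySem.List.len_eq]
  by_cases h3 : (N.length : Int) < 3
  · simp only [if_pos h3]
  · simp only [if_neg h3]
    apply PySem.List.foldl_congr_mem
    intro M x hxmem
    rw [PySem.List.mem_pyRange_one] at hxmem
    obtain ⟨hx0, hxu⟩ := hxmem
    rw [pv_innerA N x M (PySem.List.pyGetD N x 0 + PySem.List.pyGetD N (x + 1) 0) hx0,
        pv_innerB N x M (PySem.List.pyGetD N x 0 + PySem.List.pyGetD N (x + 1) 0) hx0]
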